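-- pv_equiv track=rewrite | github.com/xiyuanyang-code/My-Typst-Note | LectureNote/AlgorithmsNote/src/homework_3/1.py | check_sequence
-- ===== SOURCE A (Python) =====
-- from typing import List
-- from collections import deque, defaultdict
--
-- def check_sequence(nums: List[int], sequences: List[List[int]]) -> bool:
--     n = len(nums)
--
--     # 构建图
--     graph = defaultdict(list)   # key -> list of neighbors
--     in_degree = {num: 0 for num in nums}  # 每个节点的入度
--
--     for seq in sequences:
--         for i in range(len(seq) - 1):
--             u, v = seq[i], seq[i + 1]
--             if v not in graph[u]:
--                 graph[u].append(v)
--                 in_degree[v] += 1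
--
--     # 拓扑排序
--     queue = deque([num for num in nums if in_degree[num] == 0])
--     count = 0
--
--     while queue:
--         if len(queue) > 1:  # 多个入度为0的节点，序列不唯一
--             return False
--         current = queue.popleft()
--         count += 1
--         for neighbor in graph[current]:
--             in_degree[neighbor] -= 1
--             if in_degree[neighbor] == 0:
--                 queue.append(neighbor)
--
--     # 判断是否覆盖所有节点
--     return count == n
-- ===== SOURCE B (Python) =====
-- from typing import List
-- from collections import defaultdict
--
-- def check_sequence(nums: List[int], sequences: List[List[int]]) -> bool:
--     n = len(nums)
--
--     # same graph / in-degree construction as the original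
--     graph = defaultdict(list)
--     in_degree = {num: 0 for num in nums}
--
--     for seq in sequences:
--         for i in range(len(seq) - 1):
--             u, v = seq[i], seq[i + 1]
--             if v not in graph[u]:
--                 graph[u].append(v)
--                 in_degree[v] += 1
--
--     # queue-free elimination: each round rescan the remaining nodes for
--     # zero in-degree ones; proceed only while that node is unique.
--     remaining = list(in_degree)
--     count = 0
--     while True:
--         zeros = [x for x in remaining if in_degree[x] == 0]
--         if len(zeros) != 1:
--             break
--         cur = zeros[0]
--         remaining.remove(cur)
--         count += 1
--         for nb in graph[cur]:
--             in_degree[nb] -= 1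
--
--     return count == n
-- ===== Notes on version B (the rewrite author's own statement) =====
-- stated objective: alternative
-- what changed: The Kahn FIFO frontier queue is removed: B keeps a list of not-yet-removed distinct nodes and each round rescans it for zero in-degree nodes, proceeding only while exactly one exists.
import Mathlib
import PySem

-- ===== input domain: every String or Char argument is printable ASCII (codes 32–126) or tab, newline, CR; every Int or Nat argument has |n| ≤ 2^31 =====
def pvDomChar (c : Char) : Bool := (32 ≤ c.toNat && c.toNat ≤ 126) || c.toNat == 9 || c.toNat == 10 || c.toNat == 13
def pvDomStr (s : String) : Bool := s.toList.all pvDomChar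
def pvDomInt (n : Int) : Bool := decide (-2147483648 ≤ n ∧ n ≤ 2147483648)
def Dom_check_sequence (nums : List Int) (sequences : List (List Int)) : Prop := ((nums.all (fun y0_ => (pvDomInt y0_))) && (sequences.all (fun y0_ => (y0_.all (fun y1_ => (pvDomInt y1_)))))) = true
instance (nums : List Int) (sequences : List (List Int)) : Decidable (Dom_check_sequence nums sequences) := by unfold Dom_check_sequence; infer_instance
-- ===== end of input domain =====

-- B replaces A's Kahn FIFO frontier queue by a queue-free per-round rescan of the
-- remaining nodes for zero in-degree nodes (alternative decomposition, not faster).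

-- ===== PORT A =====
-- shared construction (these Python lines are identical in A and in B):
-- in_degree = {num: 0 for num in nums}
def pvInitDeg (nums : List Int) : PySem.Dict Int Int :=
  nums.foldl (fun d num => d.insert num 0) PySem.Dict.empty

-- one step of the edge loop: u, v = seq[i], seq[i+1]; if v not in graph[u]: append; in_degree[v] += 1
def pvEdgeStep (st : PySem.Dict Int (List Int) × PySem.Dict Int Int) (u v : Int) :
    PySem.Dict Int (List Int) × PySem.Dict Int Int :=
  if v ∈ st.1.getD u [] then st
  else
    match st.2.get? v with
    | some k => (st.1.insert u (st.1.getD u [] ++ [v]), st.2.insert v (k + 1))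
    | none => st  -- Python: in_degree[v] += 1 raises KeyError here; excluded by Pre_

def pvBuild (nums : List Int) (sequences : List (List Int)) :
    PySem.Dict Int (List Int) × PySem.Dict Int Int :=
  sequences.foldl
    (fun st seq =>
      (PySem.List.pyRange 0 (PySem.List.len seq - 1) 1).foldl
        (fun st i => pvEdgeStep st (PySem.List.pyGetD seq i 0) (PySem.List.pyGetD seq (i + 1) 0))
        st)
    (PySem.Dict.empty, pvInitDeg nums)

-- for neighbor in graph[current]: in_degree[neighbor] -= 1; if == 0: queue.append(neighbor)
def pvRelaxA (nbrs : List Int) (deg : PySem.Dict Int Int) (queue : List Int) :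
    PySem.Dict Int Int × List Int :=
  nbrs.foldl (fun st nb =>
    match st.1.get? nb with
    | some k => (st.1.insert nb (k - 1), if k - 1 == 0 then st.2 ++ [nb] else st.2)
    | none => st)  -- Python: KeyError; excluded by Pre_
    (deg, queue)

-- the while-queue loop; fuel only makes the recursion structural (nums.length + 1 is
-- enough: the sync lemma below shows the fuel-0 branch is never reached)
def pvLoopA (graph : PySem.Dict Int (List Int)) (n : Int) :
    Nat → List Int → PySem.Dict Int Int → Int → Bool
  | fuel, queue, deg, count =>
    match queue with
    | [] => count == n
    | c :: rest =>
      if (c :: rest).length > 1 then false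
      else
        match fuel with
        | 0 => count == n
        | fuel + 1 =>
          let st := pvRelaxA (graph.getD c []) deg rest
          pvLoopA graph n fuel st.2 st.1 (count + 1)

def check_sequence (nums : List Int) (sequences : List (List Int)) : Bool :=
  let n : Int := PySem.List.len nums
  let gd := pvBuild nums sequences
  let queue := nums.filter (fun num => gd.2.getD num 0 == 0)
  pvLoopA gd.1 n (nums.length + 1) queue gd.2 0

-- ===== PORT B =====
-- (the graph construction is the same Python text as in A: pvBuild above)
theorem pvRemoveLen {xs r : List Int} {v : Int} (h : PySem.List.remove? xs v = some r) :
    r.length < xs.length := by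
  have hv : v ∈ xs := by
    by_contra hv
    rw [(PySem.List.remove?_eq_none_iff xs v).mpr hv] at h
    cases h
  rw [PySem.List.remove?_eq_some_erase xs v hv] at h
  cases h
  have h1 := List.length_erase_of_mem hv
  have h2 := List.length_pos_of_mem hv
  omega

-- for nb in graph[cur]: in_degree[nb] -= 1
def pvRelaxB (nbrs : List Int) (deg : PySem.Dict Int Int) : PySem.Dict Int Int :=
  nbrs.foldl (fun d nb =>
    match d.get? nb with
    | some k => d.insert nb (k - 1)
    | none => d)  -- Python: KeyError; excluded by Pre_
    deg

-- while True: zeros = [x for x in remaining if in_degree[x] == 0]; stop unless unique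
def pvLoopB (graph : PySem.Dict Int (List Int)) (n : Int) (remaining : List Int)
    (deg : PySem.Dict Int Int) (count : Int) : Bool :=
  match remaining.filter (fun x => deg.getD x 0 == 0) with
  | [cur] =>
    match h : PySem.List.remove? remaining cur with
    | some rem' => pvLoopB graph n rem' (pvRelaxB (graph.getD cur []) deg) (count + 1)
    | none => count == n  -- Python: list.remove raises ValueError; unreachable (cur ∈ remaining)
  | _ => count == n
termination_by remaining.length
decreasing_by exact pvRemoveLen h

def check_sequence_alt (nums : List Int) (sequences : List (List Int)) : Bool :=
  let n : Int := PySem.List.len nums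
  let gd := pvBuild nums sequences
  pvLoopB gd.1 n gd.2.keys gd.2 0

-- ===== PRECONDITION & SPEC =====
-- Pre_ excludes exactly the inputs on which the Python A raises KeyError: a sequence
-- mentioning, after its first element, a value that is not in nums (B raises there too).
def Pre_check_sequence (nums : List Int) (sequences : List (List Int)) : Prop :=
  ∀ seq ∈ sequences, ∀ v ∈ seq.tail, v ∈ nums
instance (nums : List Int) (sequences : List (List Int)) : Decidable (Pre_check_sequence nums sequences) := by unfold Pre_check_sequence; infer_instance

def pvWitness_check_sequence : List Int × List (List Int) := ([1, 2, 3], [[1, 2], [2, 3]])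

def Spec_check_sequence (nums : List Int) (sequences : List (List Int)) (out : Bool) : Prop := out = check_sequence_alt nums sequences
instance (nums : List Int) (sequences : List (List Int)) (out : Bool) : Decidable (Spec_check_sequence nums sequences out) := by unfold Spec_check_sequence; infer_instance

-- ===== CLAIM (what is proved, stated in full; the proofs are below) =====
def Claim_equal_check_sequence : Prop := ∀ (nums : List Int) (sequences : List (List Int)), Dom_check_sequence nums sequences → Pre_check_sequence nums sequences → Spec_check_sequence nums sequences (check_sequence nums sequences)

-- ===== LEMMAS AND PROOFS =====

-- generic foldl invariant preservation
theorem pvFoldlInv {α σ : Type} {P : σ → Prop} (f : σ → α → σ)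
    (hf : ∀ s a, P s → P (f s a)) :
    ∀ (l : List α) (s : σ), P s → P (l.foldl f s) := by
  intro l
  induction l with
  | nil => intro s hs; exact hs
  | cons a t ih => intro s hs; exact ih _ (hf s a hs)

-- construction invariant: in_degree's keys are the distinct nums, every adjacency
-- list is duplicate-free and only mentions keys
def pvGInv (keys0 : List Int) (st : PySem.Dict Int (List Int) × PySem.Dict Int Int) : Prop :=
  st.2.keys = keys0 ∧ (∀ u, (st.1.getD u []).Nodup) ∧
  (∀ u v, v ∈ st.1.getD u [] → v ∈ keys0)

theorem pvEdgeStep_inv {keys0 : List Int}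
    {st : PySem.Dict Int (List Int) × PySem.Dict Int Int} (u v : Int)
    (h : pvGInv keys0 st) : pvGInv keys0 (pvEdgeStep st u v) := by
  obtain ⟨hk, hnd, hsub⟩ := h
  unfold pvEdgeStep
  by_cases hv : v ∈ st.1.getD u []
  · simp only [if_pos hv]; exact ⟨hk, hnd, hsub⟩
  · simp only [if_neg hv]
    cases hg : st.2.get? v with
    | none => exact ⟨hk, hnd, hsub⟩
    | some k =>
      have hc : st.2.contains v = true := by
        rw [PySem.Dict.contains_eq_isSome_get?, hg]; rfl
      have hvk : v ∈ keys0 := hk ▸ (PySem.Dict.contains_iff_mem_keys _ _).1 hc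
      refine ⟨?_, ?_, ?_⟩
      · show (st.2.insert v (k + 1)).keys = keys0
        rw [PySem.Dict.keys_insert_of_contains _ _ hc, hk]
      · intro u'
        show ((st.1.insert u _).getD u' []).Nodup
        rw [PySem.Dict.getD_insert]
        split
        · refine List.nodup_append.2 ⟨hnd u, List.nodup_singleton v, ?_⟩
          intro a ha b hb
          simp only [List.mem_singleton] at hb
          subst hb
          exact fun hEq => hv (hEq ▸ ha)
        · exact hnd u'
      · intro u' v' hv'
        rw [PySem.Dict.getD_insert] at hv'
        split at hv'
        · rcases List.mem_append.1 hv' with h1 | h1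
          · exact hsub u v' h1
          · simp only [List.mem_singleton] at h1; subst h1; exact hvk
        · exact hsub u' v' hv'

theorem pvBuild_inv (nums : List Int) (sequences : List (List Int)) :
    pvGInv (PySem.Set.ofList nums) (pvBuild nums sequences) := by
  unfold pvBuild
  refine pvFoldlInv _ ?_ _ _ ?_
  · intro st seq hst
    exact pvFoldlInv _ (fun st' i h' => pvEdgeStep_inv _ _ h') _ _ hst
  · refine ⟨?_, ?_, ?_⟩
    · show (pvInitDeg nums).keys = _
      unfold pvInitDeg
      rw [PySem.Dict.keys_foldl_insert, PySem.Dict.keys_empty, ← PySem.Set.update_empty]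
      rfl
    · intro u; simp [PySem.Dict.getD_empty]
    · intro u v hv; simp [PySem.Dict.getD_empty] at hv

-- unfolding lemmas for the relax folds
theorem pvRelaxB_nil (d : PySem.Dict Int Int) : pvRelaxB [] d = d := rfl

theorem pvRelaxB_cons (nb : Int) (t : List Int) (d : PySem.Dict Int Int) :
    pvRelaxB (nb :: t) d =
      pvRelaxB t (match d.get? nb with
        | some k => d.insert nb (k - 1)
        | none => d) := rfl

theorem pvRelaxA_cons (nb : Int) (t : List Int) (d : PySem.Dict Int Int) (q : List Int) :
    pvRelaxA (nb :: t) d q =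
      match d.get? nb with
      | some k => pvRelaxA t (d.insert nb (k - 1)) (if k - 1 == 0 then q ++ [nb] else q)
      | none => pvRelaxA t d q := by
  cases hg : d.get? nb with
  | none => simp only [pvRelaxA, List.foldl_cons, hg]
  | some k => simp only [pvRelaxA, List.foldl_cons, hg]

theorem pvRelaxB_get?_notmem {x : Int} :
    ∀ (l : List Int) (d : PySem.Dict Int Int), x ∉ l → (pvRelaxB l d).get? x = d.get? x := by
  intro l
  induction l with
  | nil => intro d _; rfl
  | cons nb t ih =>
    intro d hx
    simp only [List.mem_cons, not_or] at hx
    rw [pvRelaxB_cons]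
    cases hg : d.get? nb with
    | none => simp only [hg]; exact ih _ hx.2
    | some k =>
      simp only [hg]
      rw [ih _ hx.2, PySem.Dict.get?_insert_of_ne d (k - 1) hx.1]

theorem pvRelaxB_keys : ∀ (l : List Int) (d : PySem.Dict Int Int),
    (pvRelaxB l d).keys = d.keys := by
  intro l
  induction l with
  | nil => intro d; rfl
  | cons nb t ih =>
    intro d
    rw [pvRelaxB_cons]
    cases hg : d.get? nb with
    | none => simp only [hg]; exact ih d
    | some k =>
      simp only [hg]
      rw [ih]
      apply PySem.Dict.keys_insert_of_contains
      rw [PySem.Dict.contains_eq_isSome_get?, hg]; rfl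

theorem pvRelaxB_getD :
    ∀ (l : List Int), l.Nodup → ∀ (d : PySem.Dict Int Int) (x : Int),
      (pvRelaxB l d).getD x 0 =
        if x ∈ l ∧ (d.get? x).isSome then d.getD x 0 - 1 else d.getD x 0 := by
  intro l
  induction l with
  | nil => intro _ d x; simp [pvRelaxB_nil]
  | cons nb t ih =>
    intro hnd d x
    have hnb : nb ∉ t := (List.nodup_cons.1 hnd).1
    have hndt := (List.nodup_cons.1 hnd).2
    rw [pvRelaxB_cons]
    by_cases hx : x = nb
    · subst hx
      cases hg : d.get? x with
      | none =>
        simp only [hg]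
        rw [ih hndt]
        simp [hg, hnb]
      | some k =>
        simp only [hg]
        rw [PySem.Dict.getD_eq_get?_getD, pvRelaxB_get?_notmem t _ hnb,
          PySem.Dict.get?_insert_self]
        have hdx : d.getD x 0 = k := by rw [PySem.Dict.getD_eq_get?_getD, hg]; rfl
        simp [hdx, hg]
    · cases hg : d.get? nb with
      | none =>
        simp only [hg]
        rw [ih hndt]
        simp [hx]
      | some k =>
        simp only [hg]
        rw [ih hndt]
        have h1 : (d.insert nb (k - 1)).get? x = d.get? x :=
          PySem.Dict.get?_insert_of_ne d (k - 1) hx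
        have h2 : (d.insert nb (k - 1)).getD x 0 = d.getD x 0 := by
          rw [PySem.Dict.getD_eq_get?_getD, h1, ← PySem.Dict.getD_eq_get?_getD]
        rw [h1, h2]
        simp [hx]

theorem pvRelaxA_eq :
    ∀ (l : List Int), l.Nodup → ∀ (d : PySem.Dict Int Int) (q : List Int),
      pvRelaxA l d q =
        (pvRelaxB l d, q ++ l.filter (fun nb => d.get? nb == some 1)) := by
  intro l
  induction l with
  | nil => intro _ d q; simp [pvRelaxA, pvRelaxB]
  | cons nb t ih =>
    intro hnd d q
    have hnb : nb ∉ t := (List.nodup_cons.1 hnd).1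
    have hndt := (List.nodup_cons.1 hnd).2
    rw [pvRelaxA_cons, pvRelaxB_cons]
    cases hg : d.get? nb with
    | none =>
      simp only [hg]
      rw [ih hndt]
      simp [List.filter_cons, hg]
    | some k =>
      simp only [hg]
      rw [ih hndt]
      have hfilter : t.filter (fun x => (d.insert nb (k - 1)).get? x == some 1)
          = t.filter (fun x => d.get? x == some 1) := by
        apply List.filter_congr
        intro x hxm
        have hxnb : x ≠ nb := fun hEq => hnb (hEq ▸ hxm)
        rw [PySem.Dict.get?_insert_of_ne d (k - 1) hxnb]
      rw [hfilter]
      by_cases hk : k = 1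
      · subst hk
        simp [List.filter_cons, hg]
      · have h1 : (k - 1 == 0) = false := by
          rw [beq_eq_false_iff_ne]; omega
        have h2 : ((some k : Option Int) == some 1) = false := by
          rw [beq_eq_false_iff_ne]; intro hEq; exact hk (Option.some.inj hEq)
        simp [List.filter_cons, hg, h1, h2]

-- unfolding lemmas for the two loops
theorem pvLoopA_nil (graph : PySem.Dict Int (List Int)) (n : Int) (fuel : Nat)
    (deg : PySem.Dict Int Int) (count : Int) :
    pvLoopA graph n fuel [] deg count = (count == n) := by
  rw [pvLoopA.eq_def]

theorem pvLoopA_two (graph : PySem.Dict Int (List Int)) (n : Int) (fuel : Nat)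
    (a b : Int) (t : List Int) (deg : PySem.Dict Int Int) (count : Int) :
    pvLoopA graph n fuel (a :: b :: t) deg count = false := by
  rw [pvLoopA.eq_def]
  have h : (a :: b :: t).length > 1 := by simp
  simp [h]

theorem pvLoopA_one (graph : PySem.Dict Int (List Int)) (n : Int) (fuel : Nat)
    (c : Int) (deg : PySem.Dict Int Int) (count : Int) :
    pvLoopA graph n (fuel + 1) [c] deg count =
      pvLoopA graph n fuel (pvRelaxA (graph.getD c []) deg []).2
        (pvRelaxA (graph.getD c []) deg []).1 (count + 1) := by
  rw [pvLoopA.eq_def]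
  simp

theorem pvLoopB_not_single (graph : PySem.Dict Int (List Int)) (n : Int)
    (remaining : List Int) (deg : PySem.Dict Int Int) (count : Int)
    (h : ∀ c, remaining.filter (fun x => deg.getD x 0 == 0) ≠ [c]) :
    pvLoopB graph n remaining deg count = (count == n) := by
  rw [pvLoopB.eq_def]
  split
  · rename_i cur heq
    exact absurd heq (h cur)
  · rfl

theorem pvLoopB_single (graph : PySem.Dict Int (List Int)) (n : Int)
    (remaining : List Int) (deg : PySem.Dict Int Int) (count : Int) (c : Int)
    (hz : remaining.filter (fun x => deg.getD x 0 == 0) = [c]) (hc : c ∈ remaining) :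
    pvLoopB graph n remaining deg count =
      pvLoopB graph n (remaining.erase c) (pvRelaxB (graph.getD c []) deg) (count + 1) := by
  rw [pvLoopB.eq_def, hz]
  split
  · rename_i cur heq
    injection heq with h1 h2
    subst h1
    split
    · rename_i rem' hrm
      rw [PySem.List.remove?_eq_some_erase remaining c hc] at hrm
      injection hrm with h3
      rw [h3]
    · rename_i hrm
      rw [PySem.List.remove?_eq_some_erase remaining c hc] at hrm
      cases hrm
  · rename_i heq
    exact absurd rfl (heq c)

-- B only returns true when it has removed every remaining node
theorem pvLoopB_le (graph : PySem.Dict Int (List Int)) (n : Int) :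
    ∀ (k : Nat) (remaining : List Int) (deg : PySem.Dict Int Int) (count : Int),
      remaining.length ≤ k →
      pvLoopB graph n remaining deg count = true → n ≤ count + remaining.length := by
  intro k
  induction k with
  | zero =>
    intro remaining deg count hlen h
    have hnil : remaining = [] := List.eq_nil_of_length_eq_zero (Nat.le_zero.1 hlen)
    subst hnil
    rw [pvLoopB_not_single _ _ _ _ _ (by intro c; simp)] at h
    simp only [beq_iff_eq] at h
    simp [h]
  | succ k ih =>
    intro remaining deg count hlen h
    rw [pvLoopB.eq_def] at h
    split at h
    · rename_i cur heq
      split at h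
      · rename_i rem' hrm
        have hlt := pvRemoveLen hrm
        have := ih rem' _ _ (by omega) h
        have hcur : cur ∈ remaining := by
          by_contra hcm
          rw [(PySem.List.remove?_eq_none_iff _ _).mpr hcm] at hrm
          cases hrm
        rw [PySem.List.remove?_eq_some_erase remaining cur hcur] at hrm
        injection hrm with h2
        subst h2
        have h3 := List.length_erase_of_mem hcur
        have h4 := List.length_pos_of_mem hcur
        have h5 : ((remaining.erase cur).length : Int) = (remaining.length : Int) - 1 := by
          omega
        rw [h5] at this
        omega
      · simp only [beq_iff_eq] at h; omega
    · simp only [beq_iff_eq] at h; omega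

-- a duplicate-free list whose members are exactly {c} is [c]
theorem pvSingleton {l : List Int} {c : Int} (hnd : l.Nodup)
    (hm : ∀ x, x ∈ l ↔ x = c) : l = [c] := by
  cases l with
  | nil => exact absurd ((hm c).2 rfl) List.not_mem_nil
  | cons a t =>
    have ha : a = c := (hm a).1 List.mem_cons_self
    subst ha
    cases t with
    | nil => rfl
    | cons b s =>
      have hb : b = a := (hm b).1 (by simp)
      subst hb
      have := (List.nodup_cons.1 hnd).1
      simp at this

theorem pvNodupSubLen {l m : List Int} (hnd : l.Nodup) (hsub : ∀ x ∈ l, x ∈ m) :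
    l.length ≤ m.length := by
  calc l.length = l.toFinset.card := (List.toFinset_card_of_nodup hnd).symm
    _ ≤ m.toFinset.card :=
        Finset.card_le_card (fun x hx => List.mem_toFinset.2 (hsub x (List.mem_toFinset.1 hx)))
    _ ≤ m.length := m.toFinset_card_le

theorem pvNodupSubLenLt {l m : List Int} (hnd : l.Nodup) (hsub : ∀ x ∈ l, x ∈ m)
    (hm : ¬ m.Nodup) : l.length < m.length := by
  have h1 : l.length ≤ m.toFinset.card :=
    (List.toFinset_card_of_nodup hnd) ▸
      Finset.card_le_card (fun x hx => List.mem_toFinset.2 (hsub x (List.mem_toFinset.1 hx)))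
  have h2 : m.toFinset.card = m.dedup.length := List.card_toFinset m
  have h3 : m.dedup.length < m.length := by
    have hs := List.dedup_sublist m
    rcases Nat.lt_or_ge m.dedup.length m.length with h | h
    · exact h
    · exact absurd ((hs.eq_of_length (by have := hs.length_le; omega)) ▸ List.nodup_dedup m) hm
  omega

-- the synchronisation invariant: A's queue holds exactly the remaining zero
-- in-degree nodes, so the two loops agree
theorem pvSync (graph : PySem.Dict Int (List Int)) (n : Int) (keys0 : List Int)
    (Hnd : ∀ u, (graph.getD u []).Nodup)
    (Hsub : ∀ u v, v ∈ graph.getD u [] → v ∈ keys0) :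
    ∀ (fuel : Nat) (remaining : List Int) (deg : PySem.Dict Int Int)
      (queue : List Int) (count : Int),
      remaining.length < fuel →
      remaining.Nodup →
      (∀ x ∈ remaining, x ∈ keys0) →
      queue.Nodup →
      (∀ x, x ∈ queue ↔ x ∈ remaining ∧ deg.getD x 0 = 0) →
      (∀ x ∈ keys0, x ∉ remaining → deg.getD x 0 ≤ 0) →
      deg.keys = keys0 →
      count + remaining.length ≤ n →
      pvLoopA graph n fuel queue deg count = pvLoopB graph n remaining deg count := by
  intro fuel
  induction fuel with
  | zero =>
    intro remaining deg queue count hflt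
    exact absurd hflt (Nat.not_lt_zero _)
  | succ fuel ih =>
    intro remaining deg queue count hflt hrnd hrk hqnd hqm hneg hkeys hcnt
    cases queue with
    | nil =>
      rw [pvLoopA_nil]
      have hz : remaining.filter (fun x => deg.getD x 0 == 0) = [] := by
        rw [List.filter_eq_nil_iff]
        intro x hx hpx
        have hmem : x ∈ ([] : List Int) := (hqm x).2 ⟨hx, by simpa using hpx⟩
        simp at hmem
      rw [pvLoopB_not_single _ _ _ _ _ (by intro cc; rw [hz]; simp)]
    | cons c rest =>
      cases rest with
      | cons b t =>
        rw [pvLoopA_two]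
        have hzn : (remaining.filter (fun x => deg.getD x 0 == 0)).Nodup := hrnd.filter _
        have hmm : ∀ x, x ∈ remaining.filter (fun x => deg.getD x 0 == 0) ↔ x ∈ c :: b :: t := by
          intro x
          rw [List.mem_filter, hqm x]
          simp [beq_iff_eq]
        have hperm : (remaining.filter (fun x => deg.getD x 0 == 0)).Perm (c :: b :: t) :=
          (List.perm_ext_iff_of_nodup hzn hqnd).2 hmm
        have hlen2 : (remaining.filter (fun x => deg.getD x 0 == 0)).length = t.length + 2 := by
          rw [hperm.length_eq]; simp
        rw [pvLoopB_not_single _ _ _ _ _ (by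
          intro cur hcur; rw [hcur] at hlen2; simp at hlen2)]
        have hsubl : (remaining.filter (fun x => deg.getD x 0 == 0)).length ≤ remaining.length :=
          List.filter_sublist.length_le
        have h2 : 2 ≤ remaining.length := by omega
        symm
        rw [beq_eq_false_iff_ne]
        omega
      | nil =>
        have hcq : c ∈ remaining ∧ deg.getD c 0 = 0 := (hqm c).1 (by simp)
        have hzc : remaining.filter (fun x => deg.getD x 0 == 0) = [c] := by
          apply pvSingleton (hrnd.filter _)
          intro x
          rw [List.mem_filter]
          constructor
          · rintro ⟨h1, h2⟩
            have hmem : x ∈ [c] := (hqm x).2 ⟨h1, by simpa using h2⟩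
            simpa using hmem
          · intro hx; subst hx; exact ⟨hcq.1, by simp [hcq.2]⟩
        rw [pvLoopB_single _ _ _ _ _ _ hzc hcq.1, pvLoopA_one,
          pvRelaxA_eq _ (Hnd c)]
        have hrlen : remaining.length = (remaining.erase c).length + 1 := by
          have h3 := List.length_erase_of_mem hcq.1
          have h4 := List.length_pos_of_mem hcq.1
          omega
        have hq'mem : ∀ x, x ∈ (graph.getD c []).filter (fun nb => deg.get? nb == some 1) ↔
            x ∈ graph.getD c [] ∧ deg.get? x = some 1 := by
          intro x
          rw [List.mem_filter]
          simp
        have hget : ∀ x ∈ keys0, (deg.get? x).isSome := by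
          intro x hx
          cases hgx : deg.get? x with
          | none =>
            exact absurd (hkeys ▸ hx)
              ((PySem.Dict.get?_eq_none_iff_not_mem_keys deg x).1 hgx)
          | some k => rfl
        have hmemerase : ∀ x, x ∈ remaining.erase c ↔ x ≠ c ∧ x ∈ remaining :=
          fun x => List.Nodup.mem_erase_iff hrnd
        refine ih (remaining.erase c) (pvRelaxB (graph.getD c []) deg) _ (count + 1)
          ?_ ?_ ?_ ?_ ?_ ?_ ?_ ?_
        · omega
        · exact hrnd.erase c
        · intro x hx; exact hrk x (List.mem_of_mem_erase hx)
        · simpa using (Hnd c).filter _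
        · intro x
          simp only [List.nil_append]
          rw [hq'mem x, hmemerase x, pvRelaxB_getD _ (Hnd c)]
          constructor
          · rintro ⟨hx1, hx2⟩
            have hxk : x ∈ keys0 := Hsub c x hx1
            have hxd : deg.getD x 0 = 1 := by
              rw [PySem.Dict.getD_eq_get?_getD, hx2]; rfl
            have hxr : x ∈ remaining := by
              by_contra hxr
              have := hneg x hxk hxr
              omega
            have hxc : x ≠ c := by
              intro hEq; rw [hEq, hcq.2] at hxd; omega
            refine ⟨⟨hxc, hxr⟩, ?_⟩
            rw [if_pos ⟨hx1, by rw [hx2]; rfl⟩]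
            omega
          · rintro ⟨⟨hxc, hxr⟩, hx0⟩
            by_cases hcond : x ∈ graph.getD c [] ∧ (deg.get? x).isSome
            · rw [if_pos hcond] at hx0
              refine ⟨hcond.1, ?_⟩
              cases hgx : deg.get? x with
              | none => rw [hgx] at hcond; simp at hcond
              | some k =>
                have hgd : deg.getD x 0 = k := by
                  rw [PySem.Dict.getD_eq_get?_getD, hgx]; rfl
                have hk1 : k = 1 := by omega
                rw [hk1]
            · rw [if_neg hcond] at hx0
              have hmem : x ∈ [c] := (hqm x).2 ⟨hxr, hx0⟩
              simp at hmem
              exact absurd hmem hxc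
        · intro x hxk hxe
          rw [pvRelaxB_getD _ (Hnd c)]
          by_cases hxr : x ∈ remaining
          · have hxc : x = c := by
              by_contra hxc
              exact hxe ((hmemerase x).2 ⟨hxc, hxr⟩)
            subst hxc
            split
            · rw [hcq.2]; omega
            · rw [hcq.2]
          · have := hneg x hxk hxr
            split
            · omega
            · exact this
        · rw [pvRelaxB_keys]; exact hkeys
        · omega

-- ===== VERDICT (by name: the statement is the Claim_ definition above) =====
theorem check_sequence_spec : Claim_equal_check_sequence := by
  intro nums sequences _ _
  simp only [Spec_check_sequence, check_sequence, check_sequence_alt]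
  obtain ⟨hk, hnd, hsub⟩ := pvBuild_inv nums sequences
  rw [hk]
  have hknd : (PySem.Set.ofList nums).Nodup := PySem.Set.nodup_ofList nums
  have hkm : ∀ x, x ∈ PySem.Set.ofList nums ↔ x ∈ nums := PySem.Set.mem_ofList nums
  have hklen : (PySem.Set.ofList nums).length ≤ nums.length :=
    pvNodupSubLen hknd (fun x hx => (hkm x).1 hx)
  have hn : PySem.List.len nums = (nums.length : Int) := rfl
  have c5 : ∀ x, x ∈ nums.filter (fun num => (pvBuild nums sequences).2.getD num 0 == 0) ↔
      x ∈ PySem.Set.ofList nums ∧ (pvBuild nums sequences).2.getD x 0 = 0 := by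
    intro x
    rw [List.mem_filter]
    simp [hkm, beq_iff_eq]
  cases hfl : nums.filter (fun num => (pvBuild nums sequences).2.getD num 0 == 0) with
  | nil =>
    rw [hfl] at c5
    refine pvSync _ _ _ hnd hsub (nums.length + 1) _ _ _ 0
      (by omega) hknd (fun x hx => hx) (by simp) c5
      (fun x h1 h2 => absurd h1 h2) hk (by rw [hn]; push_cast; omega)
  | cons a rest =>
    cases rest with
    | nil =>
      rw [hfl] at c5
      refine pvSync _ _ _ hnd hsub (nums.length + 1) _ _ _ 0
        (by omega) hknd (fun x hx => hx) (by simp) c5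
        (fun x h1 h2 => absurd h1 h2) hk (by rw [hn]; push_cast; omega)
    | cons b t =>
      rw [pvLoopA_two]
      have hflen : (nums.filter (fun num => (pvBuild nums sequences).2.getD num 0 == 0)).length
          = t.length + 2 := by rw [hfl]; simp
      have hfle : (nums.filter (fun num => (pvBuild nums sequences).2.getD num 0 == 0)).length
          ≤ nums.length := List.filter_sublist.length_le
      cases hz : (PySem.Set.ofList nums).filter
          (fun x => (pvBuild nums sequences).2.getD x 0 == 0) with
      | nil =>
        rw [pvLoopB_not_single _ _ _ _ _ (by intro cc; rw [hz]; simp)]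
        symm
        rw [beq_eq_false_iff_ne, hn]
        push_cast
        omega
      | cons z zs =>
        cases zs with
        | cons w ws =>
          rw [pvLoopB_not_single _ _ _ _ _ (by intro cc; rw [hz]; simp)]
          symm
          rw [beq_eq_false_iff_ne, hn]
          push_cast
          omega
        | nil =>
          -- the duplicate case: some zero in-degree node occurs ≥ 2 times in nums
          have hmemz : ∀ x, x ∈ nums.filter
              (fun num => (pvBuild nums sequences).2.getD num 0 == 0) → x = z := by
            intro x hx
            have hx1 := List.mem_filter.1 hx
            have hx2 : x ∈ (PySem.Set.ofList nums).filter
                (fun y => (pvBuild nums sequences).2.getD y 0 == 0) :=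
              List.mem_filter.2 ⟨(hkm x).2 hx1.1, hx1.2⟩
            rw [hz] at hx2
            simpa using hx2
          have ha : a = z := hmemz a (by rw [hfl]; simp)
          have hb : b = z := hmemz b (by rw [hfl]; simp)
          have hcount : 2 ≤ List.count z nums := by
            have h1 : 2 ≤ List.count z (nums.filter
                (fun num => (pvBuild nums sequences).2.getD num 0 == 0)) := by
              rw [hfl, ha, hb]
              simp
            have h2 := (List.filter_sublist
              (l := nums) (p := fun num => (pvBuild nums sequences).2.getD num 0 == 0)).count_le z
            omega
          have hnnd : ¬ nums.Nodup := by
            intro hnodup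
            have := List.nodup_iff_count_le_one.1 hnodup z
            omega
          have hlt : (PySem.Set.ofList nums).length < nums.length :=
            pvNodupSubLenLt hknd (fun x hx => (hkm x).1 hx) hnnd
          cases hB : pvLoopB (pvBuild nums sequences).1 (PySem.List.len nums)
              (PySem.Set.ofList nums) (pvBuild nums sequences).2 0 with
          | false => rfl
          | true =>
            have := pvLoopB_le _ _ (PySem.Set.ofList nums).length _ _ _ (le_refl _) hB
            rw [hn] at this
            push_cast at this
            omega
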